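-- pv_equiv track=rewrite | github.com/RS1987X/event-feed-app | src/event_feed_app/taxonomy/rules/personnel.py | _positions_inflected_single_token
-- ===== SOURCE A (Python) =====
-- def _positions_inflected_single_token(toks, stems, suffixes):
--     hits = []
--     for i, tt in enumerate(toks):
--         for s in stems:
--             # exact inflection only (prevents join -> joint, assum -> assumption, depart -> department)
--             if any(tt == (s + suf) for suf in suffixes):
--                 hits.append(i)
--                 break
--     return hits
-- ===== SOURCE B (Python) =====
-- def _positions_inflected_single_token(toks, stems, suffixes):
--     vocab = {s + suf for s in stems for suf in suffixes}
--     return [i for i, t in enumerate(toks) if t in vocab]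
-- ===== Notes on version B (the rewrite author's own statement) =====
-- stated objective: faster
-- what changed: B precomputes the whole set of valid inflections (stem+suffix) once as a hash set, then returns by a single filtering pass over the enumerated tokens, instead of A's nested per-token scan over stems and suffixes with an accumulator and break.
import Mathlib
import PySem

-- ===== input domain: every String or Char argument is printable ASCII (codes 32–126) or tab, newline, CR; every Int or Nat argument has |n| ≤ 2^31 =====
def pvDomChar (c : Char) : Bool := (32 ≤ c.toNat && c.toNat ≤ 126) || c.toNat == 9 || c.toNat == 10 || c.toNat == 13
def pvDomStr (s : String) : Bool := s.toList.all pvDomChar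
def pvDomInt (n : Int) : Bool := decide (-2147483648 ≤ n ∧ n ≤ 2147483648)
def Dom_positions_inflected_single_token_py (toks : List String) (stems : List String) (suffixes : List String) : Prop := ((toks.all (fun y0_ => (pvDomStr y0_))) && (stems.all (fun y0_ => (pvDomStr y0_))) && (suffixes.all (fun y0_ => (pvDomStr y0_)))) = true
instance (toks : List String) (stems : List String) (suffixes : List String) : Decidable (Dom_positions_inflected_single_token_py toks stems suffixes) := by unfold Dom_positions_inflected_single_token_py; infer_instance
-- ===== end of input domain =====

-- ===== PORT A =====
-- A: for each token, scan the stems and compare the token with every concatenation stem+suffix;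
-- the inner break appends each index at most once.
def positions_inflected_single_token_py (toks : List String) (stems : List String) (suffixes : List String) : List Int :=
  (PySem.List.enumerate toks 0).foldl
    (fun hits itt =>
      if stems.any (fun s => suffixes.any (fun suf => itt.2.toList == s.toList ++ suf.toList))
      then hits ++ [itt.1] else hits) []

-- ===== PORT B =====
-- B: precompute the set of all valid inflections stem+suffix once,
-- then keep exactly the enumerated indices whose token is in that vocabulary.
def positions_inflected_single_token_py_alt (toks : List String) (stems : List String) (suffixes : List String) : List Int :=
  let vocab : PySem.Set (List Char) :=
    PySem.Set.ofList (stems.flatMap (fun s => suffixes.map (fun suf => s.toList ++ suf.toList)))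
  ((PySem.List.enumerate toks 0).filter (fun it => PySem.Set.contains vocab it.2.toList)).map (fun it => it.1)

-- ===== PRECONDITION & SPEC =====
def Spec_positions_inflected_single_token_py (toks : List String) (stems : List String) (suffixes : List String) (out : List Int) : Prop := out = positions_inflected_single_token_py_alt toks stems suffixes
instance (toks : List String) (stems : List String) (suffixes : List String) (out : List Int) : Decidable (Spec_positions_inflected_single_token_py toks stems suffixes out) := by unfold Spec_positions_inflected_single_token_py; infer_instance

-- ===== CLAIM (what is proved, stated in full; the proofs are below) =====
def Claim_equal_positions_inflected_single_token_py : Prop := ∀ (toks : List String) (stems : List String) (suffixes : List String), Dom_positions_inflected_single_token_py toks stems suffixes → Spec_positions_inflected_single_token_py toks stems suffixes (positions_inflected_single_token_py toks stems suffixes)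

-- ===== LEMMAS AND PROOFS =====

-- A's per-token hit test agrees with membership in the precomputed vocabulary.
lemma hit_iff_vocab (tt : String) (stems suffixes : List String) :
    stems.any (fun s => suffixes.any (fun suf => tt.toList == s.toList ++ suf.toList))
    = PySem.Set.contains
        (PySem.Set.ofList (stems.flatMap (fun s => suffixes.map (fun suf => s.toList ++ suf.toList))))
        tt.toList := by
  rw [Bool.eq_iff_iff]
  simp only [List.any_eq_true, beq_iff_eq, PySem.Set.contains_iff, PySem.Set.mem_ofList,
    List.mem_flatMap, List.mem_map]
  constructor
  · rintro ⟨s, hs, suf, hsuf, heq⟩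
    exact ⟨_, hs, suf, hsuf, heq.symm⟩
  · rintro ⟨s, hs, suf, hsuf, heq⟩
    exact ⟨s, hs, suf, hsuf, heq.symm⟩

-- ===== VERDICT =====
theorem positions_inflected_single_token_py_spec : Claim_equal_positions_inflected_single_token_py := by
  intro toks stems suffixes _
  unfold Spec_positions_inflected_single_token_py
  unfold positions_inflected_single_token_py positions_inflected_single_token_py_alt
  simp only [hit_iff_vocab]
  rw [PySem.List.foldl_append_if]
  rfl
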